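-- pv_equiv track=rewrite | github.com/davidkrolak/OC-Projet-8-Pur-beurre | core/management/commands/populatedb.py | string_cleaner
-- ===== SOURCE A (Python) =====
-- from string import punctuation, digits
--
-- def string_cleaner(my_str):
--     s = my_str
--     for character in punctuation:
--         my_str = my_str.replace(character, '')
--     for character in digits:
--         my_str = my_str.replace(character, '')
--
--     my_str = my_str.title().strip()
--     return my_str
-- ===== SOURCE B (Python) =====
-- from string import punctuation, digits
--
-- _TABLE = str.maketrans('', '', punctuation + digits)
--
-- def string_cleaner(my_str):
--     return my_str.translate(_TABLE).title().strip()
-- ===== Notes on version B (the rewrite author's own statement) =====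
-- stated objective: idiomatic
-- what changed: Replaces 42 sequential full-string .replace scans (one per punctuation/digit character) with a single str.translate pass using a precomputed deletion table, then the same .title().strip().
import Mathlib
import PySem

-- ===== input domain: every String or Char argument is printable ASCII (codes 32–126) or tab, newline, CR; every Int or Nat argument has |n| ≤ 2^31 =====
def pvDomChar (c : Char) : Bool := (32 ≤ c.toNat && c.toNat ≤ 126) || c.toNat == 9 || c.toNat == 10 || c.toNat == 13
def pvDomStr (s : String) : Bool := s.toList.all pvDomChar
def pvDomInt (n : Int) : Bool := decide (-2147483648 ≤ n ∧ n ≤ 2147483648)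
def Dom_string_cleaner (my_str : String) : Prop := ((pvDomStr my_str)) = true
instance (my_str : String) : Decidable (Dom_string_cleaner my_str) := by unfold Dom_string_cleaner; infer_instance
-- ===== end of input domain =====

-- B: instead of A's 42 sequential full-string replace passes, one translate pass with a
-- precomputed deletion table, then the same title-casing and strip (idiomatic rewrite).

-- string.punctuation and string.digits as character lists (shared module-level constants)
def pvPunctuation : List Char := "!\"#$%&'()*+,-./:;<=>?@[\\]^_`{|}~".toList
def pvDigits : List Char := "0123456789".toList

-- hand port of Python's str.title(), exact on the ASCII domain (cased = ASCII letter):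
-- a letter after a non-letter is uppercased, a letter after a letter is lowercased.
def pyTitle : List Char → Bool → List Char
  | [], _ => []
  | c :: rest, prevCased =>
    if PySem.Chars.isalpha c then
      (if prevCased then PySem.Chars.lowerChar c else PySem.Chars.upperChar c) :: pyTitle rest true
    else
      c :: pyTitle rest false

-- ===== PORT A =====
def string_cleaner (my_str : String) : String :=
  -- for character in punctuation: my_str = my_str.replace(character, '')
  let s1 := pvPunctuation.foldl (fun s c => PySem.Str.replace s (String.ofList [c]) "") my_str
  -- for character in digits: my_str = my_str.replace(character, '')
  let s2 := pvDigits.foldl (fun s c => PySem.Str.replace s (String.ofList [c]) "") s1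
  -- my_str = my_str.title().strip()
  PySem.Str.strip (String.ofList (pyTitle s2.toList false))

-- ===== PORT B =====
def string_cleaner_alt (my_str : String) : String :=
  -- _TABLE = str.maketrans('', '', punctuation + digits): its key set is the deletion set
  let remove : PySem.Set Char := PySem.Set.ofList (pvPunctuation ++ pvDigits)
  -- my_str.translate(_TABLE): one pass dropping every character in the table
  let cleaned : List Char := my_str.toList.filter (fun ch => decide (ch ∉ remove))
  -- return cleaned.title().strip()
  PySem.Str.strip (String.ofList (pyTitle cleaned false))

-- ===== PRECONDITION & SPEC =====
def Spec_string_cleaner (my_str : String) (out : String) : Prop := out = string_cleaner_alt my_str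
instance (my_str : String) (out : String) : Decidable (Spec_string_cleaner my_str out) := by unfold Spec_string_cleaner; infer_instance

-- ===== CLAIM (what is proved, stated in full; the proofs are below) =====
def Claim_equal_string_cleaner : Prop := ∀ (my_str : String), Dom_string_cleaner my_str → Spec_string_cleaner my_str (string_cleaner my_str)

-- ===== LEMMAS AND PROOFS =====

-- replace.go with a single-character pattern and empty replacement is a filter
theorem replace_go_single (c : Char) (l acc : List Char) (fuel : Nat) (h : fuel = l.length) :
    PySem.Chars.replace.go [c] [] fuel l acc = acc.reverse ++ l.filter (· ≠ c) := by
  induction l generalizing fuel acc with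
  | nil => subst h; rw [PySem.Chars.replace.go.eq_def]; simp
  | cons d t ih =>
    subst h
    rw [PySem.Chars.replace.go.eq_def]
    by_cases hdc : c = d
    · subst hdc
      simp [List.isPrefixOf]
      simpa using ih acc t.length rfl
    · simp [List.isPrefixOf, hdc, Ne.symm hdc]
      simpa using ih (d :: acc) t.length rfl

theorem replace_single (c : Char) (l : List Char) :
    PySem.Chars.replace l [c] [] = l.filter (· ≠ c) := by
  rw [PySem.Chars.replace]
  simp [replace_go_single c l [] l.length rfl]

-- A's per-character replace loop over a String, moved to the List Char level
theorem foldl_str_replace (L : List Char) (s : String) :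
    (L.foldl (fun s c => PySem.Str.replace s (String.ofList [c]) "") s).toList
      = L.foldl (fun cs c => PySem.Chars.replace cs [c] []) s.toList := by
  induction L generalizing s with
  | nil => rfl
  | cons c t ih =>
    simp [List.foldl_cons, ih, PySem.Str.toList_replace]

-- the replace loop over a list of characters is one filter pass
theorem foldl_replace_eq_filter (L cs : List Char) :
    L.foldl (fun cs c => PySem.Chars.replace cs [c] []) cs
      = cs.filter (fun ch => decide (ch ∉ L)) := by
  induction L generalizing cs with
  | nil => simp
  | cons c t ih =>
    rw [List.foldl_cons, replace_single, ih, List.filter_filter]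
    apply List.filter_congr
    intro x _
    by_cases hx : x = c <;> simp [hx]


theorem string_cleaner_spec' (my_str : String) :
    string_cleaner my_str = string_cleaner_alt my_str := by
  have key :
      (pvDigits.foldl (fun s c => PySem.Str.replace s (String.ofList [c]) "")
        (pvPunctuation.foldl (fun s c => PySem.Str.replace s (String.ofList [c]) "") my_str)).toList
      = my_str.toList.filter
          (fun ch => decide (ch ∉ PySem.Set.ofList (pvPunctuation ++ pvDigits))) := by
    rw [foldl_str_replace, foldl_str_replace, foldl_replace_eq_filter,
        foldl_replace_eq_filter, List.filter_filter]
    apply List.filter_congr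
    intro x _
    by_cases hp : x ∈ pvPunctuation <;> by_cases hd : x ∈ pvDigits <;>
      simp [PySem.Set.mem_ofList, hp, hd]
  simp only [string_cleaner, string_cleaner_alt, key]

-- ===== VERDICT (by name: the statement is the Claim_ definition above) =====
theorem string_cleaner_spec : Claim_equal_string_cleaner := by
  intro my_str _
  exact string_cleaner_spec' my_str
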